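-- pv_equiv track=rewrite | github.com/BbidA/CompilerLab | regex_process.py | _transform_plus_sign
-- ===== SOURCE A (Python) =====
-- def _transform_plus_sign(regular_expr):
--     if regular_expr[0] == '+':
--         raise ValueError("+ is invalid at position 0")
--
--     result = ''
--     for i in range(1, len(regular_expr)):
--         if regular_expr[i] == '+' and regular_expr[i - 1] != '\\':
--             prev_ch = regular_expr[i - 1]
--             if prev_ch == ')':
--                 pointer = i - 1
--                 while pointer >= 0 and regular_expr[pointer] != '(':
--                     pointer -= 1
--                 if pointer < 0:
--                     raise ValueError(") is invalid in position {}".format(i))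
--         else:
--             result += regular_expr[i]
--     return regular_expr
-- ===== SOURCE B (Python) =====
-- def _transform_plus_sign(regular_expr):
--     if regular_expr[0] == '+':
--         raise ValueError("+ is invalid at position 0")
--     seen_open = False
--     prev = ''
--     for i, ch in enumerate(regular_expr):
--         if i > 0 and ch == '+' and prev == ')' and not seen_open:
--             raise ValueError(") is invalid in position {}".format(i))
--         if ch == '(':
--             seen_open = True
--         prev = ch
--     return regular_expr
-- ===== Notes on version B (the rewrite author's own statement) =====
-- stated objective: alternative
-- what changed: Replaced the backward while-scan that A runs at every plus sign preceded by a closing parenthesis (and the unused result-string accumulation) by a single forward pass that tracks a boolean seen-an-opening-parenthesis flag and the previous character.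
import Mathlib
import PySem

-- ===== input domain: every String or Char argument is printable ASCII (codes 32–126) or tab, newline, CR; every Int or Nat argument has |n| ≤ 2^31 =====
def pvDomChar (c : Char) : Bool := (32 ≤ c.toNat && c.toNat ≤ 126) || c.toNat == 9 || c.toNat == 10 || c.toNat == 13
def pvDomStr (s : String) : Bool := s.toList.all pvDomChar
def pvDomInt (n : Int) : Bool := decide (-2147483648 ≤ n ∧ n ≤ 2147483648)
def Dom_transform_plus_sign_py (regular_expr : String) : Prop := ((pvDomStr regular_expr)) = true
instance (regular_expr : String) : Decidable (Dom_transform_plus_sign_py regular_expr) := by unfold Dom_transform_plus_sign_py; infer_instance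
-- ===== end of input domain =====

-- B replaces A's backward scan at each plus-after-closing-paren occurrence (and the unused
-- result-string accumulation) by one forward pass tracking whether an opening paren was seen.

-- ===== PORT A =====
-- A's backward while-loop: pointer starts at p and walks down while the char is not an
-- opening paren; true iff it stops on one (pointer still ≥ 0), false past index 0.
def pvAScan (cs : List Char) : Nat → Bool
  | 0 => cs.getD 0 ' ' = '('
  | p + 1 => if cs.getD (p + 1) ' ' = '(' then true else pvAScan cs p

-- A's main for-loop over range(1, len(regular_expr)); `none` models the ValueError raise.
def pvALoop (cs : List Char) (i : Nat) (result : List Char) : Option (List Char) :=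
  if _h : i < cs.length then
    if cs.getD i ' ' = '+' ∧ cs.getD (i - 1) ' ' ≠ '\\' then
      if cs.getD (i - 1) ' ' = ')' then
        if pvAScan cs (i - 1) then pvALoop cs (i + 1) result else none
      else pvALoop cs (i + 1) result
    else pvALoop cs (i + 1) (result ++ [cs.getD i ' '])
  else some result
termination_by cs.length - i

def transform_plus_sign_py (regular_expr : String) : String :=
  match PySem.List.pyGet? regular_expr.toList 0 with
  | none => ""          -- IndexError on the empty string (excluded by Pre_)
  | some c0 =>
    if c0 = '+' then "" -- ValueError (excluded by Pre_)
    else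
      match pvALoop regular_expr.toList 1 [] with
      | none => ""      -- ValueError (excluded by Pre_)
      | some _ => regular_expr

-- ===== PORT B =====
-- single forward pass: seen = some opening paren occurred among the chars already
-- consumed, prev = previous character; returns false on the ValueError condition.
def pvBLoop : List Char → Bool → Char → Bool
  | [], _, _ => true
  | c :: rest, seen, prev =>
    if c = '+' ∧ prev = ')' ∧ seen = false then false
    else pvBLoop rest (seen || c = '(') c

def transform_plus_sign_py_alt (regular_expr : String) : String :=
  match regular_expr.toList with
  | [] => ""            -- IndexError on the empty string (excluded by Pre_)
  | c :: rest =>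
    if c = '+' then ""  -- ValueError (excluded by Pre_)
    else if pvBLoop rest (c = '(') c then regular_expr else ""

-- ===== PRECONDITION & SPEC =====
-- Pre_ excludes exactly the inputs on which A raises (IndexError on the empty string,
-- ValueError on a leading plus, or a plus after a closing paren with no opening paren
-- anywhere to its left); B raises the same exceptions on exactly the same inputs.
def Pre_transform_plus_sign_py (regular_expr : String) : Prop :=
  regular_expr.toList ≠ [] ∧
  regular_expr.toList.headD ' ' ≠ '+' ∧
  ∀ i, i < regular_expr.toList.length →
    (1 ≤ i → regular_expr.toList.getD i ' ' = '+' →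
      regular_expr.toList.getD (i - 1) ' ' = ')' →
      '(' ∈ regular_expr.toList.take i)
instance (regular_expr : String) : Decidable (Pre_transform_plus_sign_py regular_expr) := by
  unfold Pre_transform_plus_sign_py
  have : Decidable (∀ i, i < regular_expr.toList.length →
    (1 ≤ i → regular_expr.toList.getD i ' ' = '+' →
      regular_expr.toList.getD (i - 1) ' ' = ')' →
      '(' ∈ regular_expr.toList.take i)) := Nat.decidableBallLT _ _
  infer_instance

def pvWitness_transform_plus_sign_py : String := "(a)+b"

def Spec_transform_plus_sign_py (regular_expr : String) (out : String) : Prop := out = transform_plus_sign_py_alt regular_expr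
instance (regular_expr : String) (out : String) : Decidable (Spec_transform_plus_sign_py regular_expr out) := by unfold Spec_transform_plus_sign_py; infer_instance

-- ===== CLAIM (what is proved, stated in full; the proofs are below) =====
def Claim_equal_transform_plus_sign_py : Prop := ∀ (regular_expr : String), Dom_transform_plus_sign_py regular_expr → Pre_transform_plus_sign_py regular_expr → Spec_transform_plus_sign_py regular_expr (transform_plus_sign_py regular_expr)

-- ===== LEMMAS AND PROOFS =====

-- A's backward scan from position p succeeds iff an opening paren occurs among the first p+1 chars.
lemma pvAScan_iff (cs : List Char) (p : Nat) :
    pvAScan cs p = true ↔ '(' ∈ cs.take (p + 1) := by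
  induction p with
  | zero =>
    cases cs with
    | nil => simp [pvAScan]
    | cons c rest => simp [pvAScan, List.take_succ_cons, eq_comm]
  | succ q ih =>
    rw [pvAScan]
    by_cases h : cs.getD (q + 1) ' ' = '('
    · simp only [h, if_true, true_iff]
      have hlt : q + 1 < cs.length := by
        by_contra hge
        have : cs.getD (q + 1) ' ' = ' ' := List.getD_eq_default cs ' ' (by omega)
        rw [this] at h; exact absurd h (by decide)
      exact List.mem_take_iff_getElem.mpr
        ⟨q + 1, by omega, by rw [← List.getD_eq_getElem cs ' ' hlt, h]⟩
    · rw [if_neg h, ih]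
      constructor
      · intro hm
        rcases List.mem_take_iff_getElem.mp hm with ⟨j, hj, hje⟩
        exact List.mem_take_iff_getElem.mpr ⟨j, by omega, hje⟩
      · intro hm
        rcases List.mem_take_iff_getElem.mp hm with ⟨j, hj, hje⟩
        rcases Nat.lt_or_ge j (q + 1) with hj1 | hj1
        · exact List.mem_take_iff_getElem.mpr ⟨j, by omega, hje⟩
        · exfalso
          have hjq : j = q + 1 := by omega
          have hlen : j < cs.length := by omega
          apply h
          rw [← hjq, List.getD_eq_getElem cs ' ' hlen, hje]

-- Core invariant: from any position i ≥ 1, A's loop succeeds iff B's loop succeeds.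
lemma pvLoop_agree (cs : List Char) (i : Nat) (hi : 1 ≤ i) (res : List Char) :
    (pvALoop cs i res).isSome
      = pvBLoop (cs.drop i) (decide ('(' ∈ cs.take i)) (cs.getD (i - 1) ' ') := by
  by_cases h : i < cs.length
  · have hdrop : cs.drop i = cs.getD i ' ' :: cs.drop (i + 1) := by
      rw [List.getD_eq_getElem cs ' ' h]
      exact (List.getElem_cons_drop h).symm
    have htake : cs.take (i + 1) = cs.take i ++ [cs.getD i ' '] := by
      rw [List.getD_eq_getElem cs ' ' h]
      exact List.take_succ_eq_append_getElem h
    have hseen' : (decide ('(' ∈ cs.take i) || decide (cs.getD i ' ' = '('))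
        = decide ('(' ∈ cs.take (i + 1)) := by
      rw [htake]; simp [eq_comm]
    have hsub : i + 1 - 1 = i := by omega
    rw [pvALoop, dif_pos h, hdrop, pvBLoop]
    by_cases hplus : cs.getD i ' ' = '+'
    · by_cases hprev : cs.getD (i - 1) ' ' = ')'
      · have hns : cs.getD (i - 1) ' ' ≠ '\\' := by rw [hprev]; decide
        have hscan : pvAScan cs (i - 1) = true ↔ '(' ∈ cs.take i := by
          have := pvAScan_iff cs (i - 1)
          rwa [show i - 1 + 1 = i by omega] at this
        by_cases hmem : '(' ∈ cs.take i
        · have hBcond : ¬ (cs.getD i ' ' = '+' ∧ cs.getD (i - 1) ' ' = ')' ∧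
              decide ('(' ∈ cs.take i) = false) := by
            rintro ⟨_, _, hsf⟩
            rw [decide_eq_true hmem] at hsf
            cases hsf
          rw [if_pos ⟨hplus, hns⟩, if_pos hprev, if_pos (hscan.mpr hmem),
            if_neg hBcond, pvLoop_agree cs (i + 1) (by omega) res, hsub, hseen']
        · have hscanF : ¬ pvAScan cs (i - 1) = true := fun hs => hmem (hscan.mp hs)
          rw [if_pos ⟨hplus, hns⟩, if_pos hprev, if_neg hscanF,
            if_pos ⟨hplus, hprev, decide_eq_false hmem⟩]
          simp
      · have hBcond : ¬ (cs.getD i ' ' = '+' ∧ cs.getD (i - 1) ' ' = ')' ∧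
            decide ('(' ∈ cs.take i) = false) := by
          rintro ⟨_, hp, _⟩; exact hprev hp
        rw [if_neg hBcond]
        by_cases hns : cs.getD (i - 1) ' ' = '\\'
        · have hAcond : ¬ (cs.getD i ' ' = '+' ∧ cs.getD (i - 1) ' ' ≠ '\\') := by
            rintro ⟨_, hc⟩; exact hc hns
          rw [if_neg hAcond,
            pvLoop_agree cs (i + 1) (by omega) (res ++ [cs.getD i ' ']), hsub, hseen']
        · rw [if_pos ⟨hplus, hns⟩, if_neg hprev,
            pvLoop_agree cs (i + 1) (by omega) res, hsub, hseen']
    · have hAcond : ¬ (cs.getD i ' ' = '+' ∧ cs.getD (i - 1) ' ' ≠ '\\') := by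
        rintro ⟨hc, _⟩; exact hplus hc
      have hBcond : ¬ (cs.getD i ' ' = '+' ∧ cs.getD (i - 1) ' ' = ')' ∧
          decide ('(' ∈ cs.take i) = false) := by
        rintro ⟨hc, _, _⟩; exact hplus hc
      rw [if_neg hAcond, if_neg hBcond,
        pvLoop_agree cs (i + 1) (by omega) (res ++ [cs.getD i ' ']), hsub, hseen']
  · rw [pvALoop, dif_neg h, List.drop_eq_nil_of_le (by omega), pvBLoop]
    simp
termination_by cs.length - i

-- The two ports agree on every input (raise paths included: both ports yield the empty string there).
lemma ports_agree (s : String) :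
    transform_plus_sign_py s = transform_plus_sign_py_alt s := by
  unfold transform_plus_sign_py transform_plus_sign_py_alt
  cases hcs : s.toList with
  | nil => simp [PySem.List.pyGet?, PySem.List.pyIdx?]
  | cons c rest =>
    have hget : PySem.List.pyGet? (c :: rest) (0 : Int) = some c := by
      simp [PySem.List.pyGet?, PySem.List.pyIdx?]
    rw [hget]
    by_cases hc : c = '+'
    · simp [hc]
    · simp only [if_neg hc]
      have hmain := pvLoop_agree (c :: rest) 1 (le_refl 1) []
      have hdrop : (c :: rest).drop 1 = rest := rfl
      have htake : decide ('(' ∈ (c :: rest).take 1) = decide (c = '(') := by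
        simp [List.take_succ_cons, eq_comm]
      have hprev : (c :: rest).getD 0 ' ' = c := rfl
      rw [hdrop, htake, hprev] at hmain
      cases hA : pvALoop (c :: rest) 1 [] with
      | none =>
        rw [hA] at hmain
        simp only [Option.isSome_none] at hmain
        rw [← hmain]
        simp
      | some r =>
        rw [hA] at hmain
        simp only [Option.isSome_some] at hmain
        rw [← hmain]
        simp

-- ===== VERDICT (by name: the statement is the Claim_ definition above) =====
theorem transform_plus_sign_py_spec : Claim_equal_transform_plus_sign_py := by
  intro s _ _
  unfold Spec_transform_plus_sign_py
  exact ports_agree s
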